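-- pv_equiv track=rewrite | github.com/mariiio/rally-cut | analysis/scripts/sweep_switch_penalty.py | find_best_permutation
-- ===== SOURCE A (Python) =====
-- import itertools
--
-- def find_best_permutation(
--     gt_rallies: dict[str, dict[str, int]],
--     pred_rallies: dict[str, dict[str, int]],
-- ) -> tuple[dict[int, int], int, int]:
--     player_ids = [1, 2, 3, 4]
--     best_perm: dict[int, int] = {}
--     best_correct = -1
--     best_total = 0
--     for perm in itertools.permutations(player_ids):
--         pred_to_gt = dict(zip(player_ids, perm))
--         correct = total = 0
--         for rid in gt_rallies:
--             if rid not in pred_rallies: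
--                 continue
--             for tid_str in gt_rallies[rid]:
--                 if tid_str not in pred_rallies[rid]:
--                     continue
--                 total += 1
--                 if pred_to_gt.get(pred_rallies[rid][tid_str]) == gt_rallies[rid][tid_str]:
--                     correct += 1
--         if correct > best_correct:
--             best_correct = correct
--             best_total = total
--             best_perm = pred_to_gt
--     return best_perm, best_correct, best_total
-- ===== SOURCE B (Python) =====
-- import itertools
--
--
-- def find_best_permutation(
--     gt_rallies: dict[str, dict[str, int]],
--     pred_rallies: dict[str, dict[str, int]],
-- ) -> tuple[dict[int, int], int, int]:
--     player_ids = [1, 2, 3, 4]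
--     # One pass: collect every matched (predicted id, ground-truth id) pair.
--     pairs = [
--         (preds[tid_str], gt_id)
--         for rid, gmap in gt_rallies.items()
--         if (preds := pred_rallies.get(rid)) is not None
--         for tid_str, gt_id in gmap.items()
--         if tid_str in preds
--     ]
--     counts: dict[tuple[int, int], int] = {}
--     for pg in pairs:
--         counts[pg] = counts.get(pg, 0) + 1
--     # Score each of the 24 permutations from the small count table.
--     best_perm: dict[int, int] = {}
--     best_correct = -1
--     for perm in itertools.permutations(player_ids):
--         pred_to_gt = dict(zip(player_ids, perm))
--         correct = sum(
--             n for (p, g), n in counts.items() if pred_to_gt.get(p) == g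
--         )
--         if correct > best_correct:
--             best_correct = correct
--             best_perm = pred_to_gt
--     return best_perm, best_correct, len(pairs)
-- ===== Notes on version B (the rewrite author's own statement) =====
-- stated objective: faster
-- what changed: B makes a single pass over the rally dicts collecting all matched (predicted-id, ground-truth-id) pairs into a count table, then scores each of the 24 permutations from that small table, instead of A's rescanning every rally for every permutation.
import Mathlib
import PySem

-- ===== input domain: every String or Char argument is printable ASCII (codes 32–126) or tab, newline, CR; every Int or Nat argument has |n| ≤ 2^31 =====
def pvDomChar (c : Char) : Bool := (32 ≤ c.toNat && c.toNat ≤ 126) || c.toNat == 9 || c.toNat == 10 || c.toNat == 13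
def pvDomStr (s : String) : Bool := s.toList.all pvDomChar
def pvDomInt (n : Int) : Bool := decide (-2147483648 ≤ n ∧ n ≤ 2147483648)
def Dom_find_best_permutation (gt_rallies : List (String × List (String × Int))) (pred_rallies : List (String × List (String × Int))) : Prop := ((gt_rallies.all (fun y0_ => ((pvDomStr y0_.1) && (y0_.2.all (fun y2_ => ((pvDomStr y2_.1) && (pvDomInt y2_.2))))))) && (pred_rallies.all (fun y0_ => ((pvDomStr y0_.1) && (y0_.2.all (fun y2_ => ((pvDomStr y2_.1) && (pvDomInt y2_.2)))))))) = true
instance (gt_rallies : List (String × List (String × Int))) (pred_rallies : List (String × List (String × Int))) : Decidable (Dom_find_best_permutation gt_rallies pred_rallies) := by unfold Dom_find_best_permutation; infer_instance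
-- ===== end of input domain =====

-- B replaces A's per-permutation rescan of all rallies by one pass building a
-- (predicted id, ground-truth id) match-count table, from which all 24 permutations are scored.

-- ===== PORT A =====
def find_best_permutation (gt_rallies : List (String × List (String × Int))) (pred_rallies : List (String × List (String × Int))) : (List (Int × Int)) × Int × Int :=
  let player_ids : List Int := [1, 2, 3, 4]
  let gtD : PySem.Dict String (PySem.Dict String Int) :=
    PySem.Dict.ofList (gt_rallies.map (fun kv => (kv.1, PySem.Dict.ofList kv.2)))
  let predD : PySem.Dict String (PySem.Dict String Int) :=
    PySem.Dict.ofList (pred_rallies.map (fun kv => (kv.1, PySem.Dict.ofList kv.2)))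
  let res :=
    (PySem.List.permutations player_ids 4).foldl
      (fun best perm =>
        let pred_to_gt : PySem.Dict Int Int := PySem.Dict.ofList (player_ids.zip perm)
        let ct :=
          gtD.keys.foldl
            (fun ct rid =>
              if predD.contains rid then
                (gtD.getD rid PySem.Dict.empty).keys.foldl
                  (fun ct2 tid =>
                    if (predD.getD rid PySem.Dict.empty).contains tid then
                      if pred_to_gt.get? ((predD.getD rid PySem.Dict.empty).getD tid 0)
                          == some ((gtD.getD rid PySem.Dict.empty).getD tid 0) then
                        (ct2.1 + 1, ct2.2 + 1)
                      else (ct2.1, ct2.2 + 1)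
                    else ct2)
                  ct
              else ct)
            ((0 : Int), (0 : Int))
        if ct.1 > best.2.1 then (pred_to_gt, ct.1, ct.2) else best)
      ((PySem.Dict.empty : PySem.Dict Int Int), (-1 : Int), (0 : Int))
  (res.1.items, res.2.1, res.2.2)

-- ===== PORT B =====
def find_best_permutation_alt (gt_rallies : List (String × List (String × Int))) (pred_rallies : List (String × List (String × Int))) : (List (Int × Int)) × Int × Int :=
  let player_ids : List Int := [1, 2, 3, 4]
  let gtD : PySem.Dict String (PySem.Dict String Int) :=
    PySem.Dict.ofList (gt_rallies.map (fun kv => (kv.1, PySem.Dict.ofList kv.2)))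
  let predD : PySem.Dict String (PySem.Dict String Int) :=
    PySem.Dict.ofList (pred_rallies.map (fun kv => (kv.1, PySem.Dict.ofList kv.2)))
  let pairs : List (Int × Int) :=
    gtD.items.flatMap (fun rg =>
      match predD.get? rg.1 with
      | some preds =>
          rg.2.items.filterMap (fun tg =>
            if preds.contains tg.1 then some (preds.getD tg.1 0, tg.2) else none)
      | none => [])
  let counts : PySem.Dict (Int × Int) Int :=
    pairs.foldl (fun d pg => d.insert pg (d.getD pg 0 + 1)) PySem.Dict.empty
  let res :=
    (PySem.List.permutations player_ids 4).foldl
      (fun best perm =>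
        let pred_to_gt : PySem.Dict Int Int := PySem.Dict.ofList (player_ids.zip perm)
        let correct : Int :=
          ((counts.items.filter (fun pgn => pred_to_gt.get? pgn.1.1 == some pgn.1.2)).map
            (fun pgn => pgn.2)).sum
        if correct > best.2 then (pred_to_gt, correct) else best)
      ((PySem.Dict.empty : PySem.Dict Int Int), (-1 : Int))
  (res.1.items, res.2, (pairs.length : Int))

-- ===== PRECONDITION & SPEC =====
def Spec_find_best_permutation (gt_rallies : List (String × List (String × Int))) (pred_rallies : List (String × List (String × Int))) (out : (List (Int × Int)) × Int × Int) : Prop := out = find_best_permutation_alt gt_rallies pred_rallies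
instance (gt_rallies : List (String × List (String × Int))) (pred_rallies : List (String × List (String × Int))) (out : (List (Int × Int)) × Int × Int) : Decidable (Spec_find_best_permutation gt_rallies pred_rallies out) := by unfold Spec_find_best_permutation; infer_instance

-- ===== CLAIM (what is proved, stated in full; the proofs are below) =====
def Claim_equal_find_best_permutation : Prop := ∀ (gt_rallies : List (String × List (String × Int))) (pred_rallies : List (String × List (String × Int))), Dom_find_best_permutation gt_rallies pred_rallies → Spec_find_best_permutation gt_rallies pred_rallies (find_best_permutation gt_rallies pred_rallies)

-- ===== LEMMAS AND PROOFS =====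

-- interpreting the raw association lists as Python dicts (shared shape of both ports)
def pvMkD (l : List (String × List (String × Int))) : PySem.Dict String (PySem.Dict String Int) :=
  PySem.Dict.ofList (l.map (fun kv => (kv.1, PySem.Dict.ofList kv.2)))

-- A's inner per-rally loop body
def pvInnerStep (pm gm : PySem.Dict String Int) (m : PySem.Dict Int Int) (ct2 : Int × Int) (tid : String) : Int × Int :=
    if pm.contains tid then
      if m.get? (pm.getD tid 0) == some (gm.getD tid 0) then (ct2.1 + 1, ct2.2 + 1)
      else (ct2.1, ct2.2 + 1)
    else ct2

-- A's per-permutation step, as the port writes it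
def pvRawStepA (gtD predD : PySem.Dict String (PySem.Dict String Int)) :
    (PySem.Dict Int Int × Int × Int) → List Int → PySem.Dict Int Int × Int × Int :=
  fun best perm =>
    let pred_to_gt : PySem.Dict Int Int := PySem.Dict.ofList (([1, 2, 3, 4] : List Int).zip perm)
    let ct :=
      gtD.keys.foldl
        (fun ct rid =>
          if predD.contains rid then
            (gtD.getD rid PySem.Dict.empty).keys.foldl
              (pvInnerStep (predD.getD rid PySem.Dict.empty) (gtD.getD rid PySem.Dict.empty) pred_to_gt)
              ct
          else ct)
        ((0 : Int), (0 : Int))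
    if ct.1 > best.2.1 then (pred_to_gt, ct.1, ct.2) else best

-- B's matched-pairs list, as the port writes it
def pvRawPairs (gtD predD : PySem.Dict String (PySem.Dict String Int)) : List (Int × Int) :=
  gtD.items.flatMap (fun rg =>
    match predD.get? rg.1 with
    | some preds =>
        rg.2.items.filterMap (fun tg =>
          if preds.contains tg.1 then some (preds.getD tg.1 0, tg.2) else none)
    | none => [])

-- B's per-permutation step, as the port writes it
def pvRawStepB (counts : PySem.Dict (Int × Int) Int) :
    (PySem.Dict Int Int × Int) → List Int → PySem.Dict Int Int × Int :=
  fun best perm =>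
    let pred_to_gt : PySem.Dict Int Int := PySem.Dict.ofList (([1, 2, 3, 4] : List Int).zip perm)
    let correct : Int :=
      ((counts.items.filter (fun pgn => pred_to_gt.get? pgn.1.1 == some pgn.1.2)).map
        (fun pgn => pgn.2)).sum
    if correct > best.2 then (pred_to_gt, correct) else best

-- canonical matched-pairs list (keys-based form)
def pvPairsR (gtD predD : PySem.Dict String (PySem.Dict String Int)) (rids : List String) : List (Int × Int) :=
  rids.flatMap (fun rid =>
    if predD.contains rid then
      (gtD.getD rid PySem.Dict.empty).keys.filterMap (fun tid =>
        if (predD.getD rid PySem.Dict.empty).contains tid then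
          some ((predD.getD rid PySem.Dict.empty).getD tid 0, (gtD.getD rid PySem.Dict.empty).getD tid 0)
        else none)
    else [])

def pvMk (perm : List Int) : PySem.Dict Int Int :=
  PySem.Dict.ofList (([1, 2, 3, 4] : List Int).zip perm)

def pvScore (P : List (Int × Int)) (perm : List Int) : Nat :=
  P.countP (fun pg => (pvMk perm).get? pg.1 == some pg.2)

def pvStepA (P : List (Int × Int)) (b : PySem.Dict Int Int × Int × Int) (perm : List Int) :
    PySem.Dict Int Int × Int × Int :=
  if ((pvScore P perm : Int)) > b.2.1 then (pvMk perm, (pvScore P perm : Int), (P.length : Int)) else b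

def pvStepB (P : List (Int × Int)) (b : PySem.Dict Int Int × Int) (perm : List Int) :
    PySem.Dict Int Int × Int :=
  if ((pvScore P perm : Int)) > b.2 then (pvMk perm, (pvScore P perm : Int)) else b

lemma pv_get?_ofList_mem {κ ν : Type} [BEq κ] [LawfulBEq κ] [DecidableEq κ] (l : List (κ × ν)) (k : κ) (v : ν)
    (h : (PySem.Dict.ofList l).get? k = some v) : v ∈ l.map Prod.snd := by
  have hfold : ∀ (ps : List (κ × ν)),
      PySem.Dict.ofList ps = ps.foldl (fun d kv => d.insert kv.1 kv.2) PySem.Dict.empty :=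
    fun _ => rfl
  induction l using List.reverseRecOn with
  | nil =>
    rw [hfold] at h
    simp [PySem.Dict.get?_empty] at h
  | append_singleton l x ih =>
    rw [hfold, List.foldl_append] at h
    simp only [List.foldl_cons, List.foldl_nil] at h
    rw [PySem.Dict.get?_insert] at h
    by_cases hk : k = x.1
    · rw [if_pos hk] at h
      cases h
      simp [List.map_append]
    · rw [if_neg hk, ← hfold] at h
      simp only [List.map_append, List.mem_append]
      exact Or.inl (ih h)

lemma pv_values_nodup (l : List (String × List (String × Int))) (rid : String) :
    ((pvMkD l).getD rid PySem.Dict.empty).keys.Nodup := by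
  cases h : (pvMkD l).get? rid with
  | none =>
    rw [PySem.Dict.getD_of_get?_eq_none _ PySem.Dict.empty h]
    exact PySem.Dict.nodup_keys_empty
  | some gm =>
    rw [PySem.Dict.getD_of_get?_eq_some _ PySem.Dict.empty h]
    unfold pvMkD at h
    have hm := pv_get?_ofList_mem _ _ _ h
    rw [List.map_map] at hm
    obtain ⟨kv, _, hkv⟩ := List.mem_map.mp hm
    rw [← hkv]
    exact PySem.Dict.nodup_keys_ofList kv.2

lemma pv_innerA (pm gm : PySem.Dict String Int) (m : PySem.Dict Int Int) (tids : List String) (c t : Int) :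
    tids.foldl (pvInnerStep pm gm m) (c, t)
      = (c + ((tids.filterMap (fun tid =>
            if pm.contains tid then some (pm.getD tid 0, gm.getD tid 0) else none)).countP
            (fun pg => m.get? pg.1 == some pg.2) : Int),
         t + ((tids.filterMap (fun tid =>
            if pm.contains tid then some (pm.getD tid 0, gm.getD tid 0) else none)).length : Int)) := by
  induction tids generalizing c t with
  | nil => simp
  | cons tid tids ih =>
    by_cases hc : pm.contains tid = true
    · by_cases hm : (m.get? (pm.getD tid 0) == some (gm.getD tid 0)) = true
      · have hstep : pvInnerStep pm gm m (c, t) tid = (c + 1, t + 1) := by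
          simp [pvInnerStep, hc, hm]
        rw [List.foldl_cons, hstep, ih]
        simp [List.filterMap_cons, hc, hm, Prod.ext_iff]
        omega
      · have hstep : pvInnerStep pm gm m (c, t) tid = (c, t + 1) := by
          simp [pvInnerStep, hc, hm]
        rw [List.foldl_cons, hstep, ih]
        simp [List.filterMap_cons, hc, hm, Prod.ext_iff]
        omega
    · have hstep : pvInnerStep pm gm m (c, t) tid = (c, t) := by
        simp [pvInnerStep, hc]
      rw [List.foldl_cons, hstep, ih]
      simp [hc]

lemma pv_outerA (gtD predD : PySem.Dict String (PySem.Dict String Int)) (m : PySem.Dict Int Int)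
    (rids : List String) (c t : Int) :
    rids.foldl
      (fun ct rid =>
        if predD.contains rid then
          (gtD.getD rid PySem.Dict.empty).keys.foldl
            (pvInnerStep (predD.getD rid PySem.Dict.empty) (gtD.getD rid PySem.Dict.empty) m) ct
        else ct)
      (c, t)
      = (c + ((pvPairsR gtD predD rids).countP (fun pg => m.get? pg.1 == some pg.2) : Int),
         t + ((pvPairsR gtD predD rids).length : Int)) := by
  induction rids generalizing c t with
  | nil => simp [pvPairsR]
  | cons rid rids ih =>
    rw [List.foldl_cons]
    by_cases hc : predD.contains rid = true
    · rw [if_pos hc, pv_innerA, ih]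
      simp [pvPairsR, List.flatMap_cons, hc, List.countP_append, Prod.ext_iff]
      omega
    · rw [if_neg hc, ih]
      simp [pvPairsR, List.flatMap_cons, hc]

lemma pv_pairsB (gtD predD : PySem.Dict String (PySem.Dict String Int))
    (hg : gtD.keys.Nodup) (hv : ∀ rid, (gtD.getD rid PySem.Dict.empty).keys.Nodup) :
    pvRawPairs gtD predD = pvPairsR gtD predD gtD.keys := by
  unfold pvRawPairs pvPairsR
  rw [PySem.Dict.items_eq_map_keys gtD hg PySem.Dict.empty, List.flatMap_map]
  congr 1
  funext rid
  dsimp only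
  cases h : predD.get? rid with
  | none =>
    have hmem : rid ∉ predD.keys := (PySem.Dict.get?_eq_none_iff_not_mem_keys predD rid).mp h
    have hc : ¬ (predD.contains rid = true) := fun hcc =>
      hmem ((PySem.Dict.contains_iff_mem_keys predD rid).mp hcc)
    simp [hc]
  | some preds =>
    have hmem : rid ∈ predD.keys := by
      by_contra hn
      rw [← PySem.Dict.get?_eq_none_iff_not_mem_keys] at hn
      rw [hn] at h
      cases h
    have hc : predD.contains rid = true := (PySem.Dict.contains_iff_mem_keys predD rid).mpr hmem
    dsimp only
    rw [if_pos hc, PySem.Dict.getD_of_get?_eq_some _ PySem.Dict.empty h]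
    rw [PySem.Dict.items_eq_map_keys (gtD.getD rid PySem.Dict.empty) (hv rid) (0 : Int),
      List.filterMap_map]
    rfl

lemma pv_countP_eq_nodup {α : Type} [BEq α] [LawfulBEq α] (x : α) (L : List α) (h : L.Nodup) :
    L.countP (fun y => x == y) = if x ∈ L then 1 else 0 := by
  induction L with
  | nil => simp
  | cons a L ih =>
    rw [List.nodup_cons] at h
    obtain ⟨ha, hL⟩ := h
    by_cases hxa : x = a
    · subst hxa
      simp [ih hL, ha]
    · simp [ih hL, hxa, List.mem_cons]

lemma pv_sum_count (m : PySem.Dict Int Int) (K P : List (Int × Int)) (hK : K.Nodup)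
    (hmem : ∀ a ∈ P, a ∈ K) :
    (((K.map (fun k => (k, (List.count k P : Int)))).filter
        (fun pgn => m.get? pgn.1.1 == some pgn.1.2)).map (fun pgn => pgn.2)).sum
      = (P.countP (fun pg => m.get? pg.1 == some pg.2) : Int) := by
  rw [List.filter_map, List.map_map]
  simp only [Function.comp_def]
  revert hmem
  induction P with
  | nil => intro _; simp
  | cons x P ih =>
    intro hmem
    have hcnt : ∀ pg : Int × Int,
        (List.count pg (x :: P) : Int) = (List.count pg P : Int) + (if x == pg then (1 : Int) else 0) := by
      intro pg
      by_cases hx : (x == pg) = true <;> simp [List.count_cons, hx]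
    rw [List.map_congr_left (fun pg _ => hcnt pg), PySem.List.sum_map_add_int]
    rw [ih (fun a ha => hmem a (List.mem_cons_of_mem _ ha))]
    rw [PySem.List.sum_map_ite_one_zero]
    rw [pv_countP_eq_nodup x _ (List.Nodup.filter _ hK)]
    have hxK : x ∈ K := hmem x List.mem_cons_self
    rw [List.countP_cons]
    by_cases hq : (m.get? x.1 == some x.2) = true
    · have hmemf : x ∈ K.filter (fun k => m.get? k.1 == some k.2) :=
        List.mem_filter.mpr ⟨hxK, hq⟩
      simp [hmemf, hq]
    · have hmemf : x ∉ K.filter (fun k => m.get? k.1 == some k.2) := fun hin =>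
        hq (List.mem_filter.mp hin).2
      simp [hmemf, hq]

lemma pv_stepA_eq (gtD predD : PySem.Dict String (PySem.Dict String Int))
    (b : PySem.Dict Int Int × Int × Int) (perm : List Int) :
    pvRawStepA gtD predD b perm = pvStepA (pvPairsR gtD predD gtD.keys) b perm := by
  unfold pvRawStepA pvStepA
  dsimp only
  rw [pv_outerA]
  simp [pvScore, pvMk]

lemma pv_stepB_eq (P : List (Int × Int)) (b : PySem.Dict Int Int × Int) (perm : List Int) :
    pvRawStepB (PySem.Dict.counter P) b perm = pvStepB P b perm := by
  unfold pvRawStepB pvStepB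
  dsimp only
  rw [PySem.Dict.items_counter]
  rw [pv_sum_count (PySem.Dict.ofList (([1, 2, 3, 4] : List Int).zip perm)) _ P
    (PySem.Set.nodup_ofList P) (fun a ha => (PySem.Set.mem_ofList P a).mpr ha)]
  simp [pvScore, pvMk]

lemma pv_tail (P : List (Int × Int)) (perms : List (List Int)) :
    ∀ (d : PySem.Dict Int Int) (c : Int),
      perms.foldl (pvStepA P) (d, c, (P.length : Int))
        = ((perms.foldl (pvStepB P) (d, c)).1, (perms.foldl (pvStepB P) (d, c)).2, (P.length : Int)) := by
  intro d c
  induction perms generalizing d c with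
  | nil => simp
  | cons p ps ih =>
    rw [List.foldl_cons, List.foldl_cons]
    by_cases h : ((pvScore P p : Int)) > c
    · have h1 : pvStepA P (d, c, (P.length : Int)) p = (pvMk p, (pvScore P p : Int), (P.length : Int)) := by
        simp [pvStepA, h]
      have h2 : pvStepB P (d, c) p = (pvMk p, (pvScore P p : Int)) := by
        simp [pvStepB, h]
      rw [h1, h2, ih]
    · have h1 : pvStepA P (d, c, (P.length : Int)) p = (d, c, (P.length : Int)) := by
        simp [pvStepA, h]
      have h2 : pvStepB P (d, c) p = (d, c) := by
        simp [pvStepB, h]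
      rw [h1, h2, ih]

lemma pv_head (P : List (Int × Int)) :
    (PySem.List.permutations ([1, 2, 3, 4] : List Int) 4).foldl (pvStepA P)
        (PySem.Dict.empty, (-1 : Int), (0 : Int))
      = (((PySem.List.permutations ([1, 2, 3, 4] : List Int) 4).foldl (pvStepB P)
            (PySem.Dict.empty, (-1 : Int))).1,
         ((PySem.List.permutations ([1, 2, 3, 4] : List Int) 4).foldl (pvStepB P)
            (PySem.Dict.empty, (-1 : Int))).2,
         (P.length : Int)) := by
  obtain ⟨p, ps, hcons⟩ : ∃ p ps, PySem.List.permutations ([1, 2, 3, 4] : List Int) 4 = p :: ps := by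
    rcases h : PySem.List.permutations ([1, 2, 3, 4] : List Int) 4 with _ | ⟨a, l⟩
    · exact absurd h (by decide)
    · exact ⟨a, l, rfl⟩
  rw [hcons]
  rw [List.foldl_cons, List.foldl_cons]
  have hpos : ((pvScore P p : Int)) > -1 := by omega
  have h1 : pvStepA P (PySem.Dict.empty, (-1 : Int), (0 : Int)) p
      = (pvMk p, (pvScore P p : Int), (P.length : Int)) := by
    simp [pvStepA, hpos]
  have h2 : pvStepB P (PySem.Dict.empty, (-1 : Int)) p = (pvMk p, (pvScore P p : Int)) := by
    simp [pvStepB, hpos]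
  rw [h1, h2]
  exact pv_tail P ps (pvMk p) _

-- ===== VERDICT (by name: the statement is the Claim_ definition above) =====
theorem find_best_permutation_spec : Claim_equal_find_best_permutation := by
  intro gt pred _
  show (let res := (PySem.List.permutations ([1, 2, 3, 4] : List Int) 4).foldl
          (pvRawStepA (pvMkD gt) (pvMkD pred)) (PySem.Dict.empty, (-1 : Int), (0 : Int))
        (res.1.items, res.2.1, res.2.2))
     = (let pairs := pvRawPairs (pvMkD gt) (pvMkD pred)
        let res := (PySem.List.permutations ([1, 2, 3, 4] : List Int) 4).foldl
          (pvRawStepB (pairs.foldl (fun d pg => d.insert pg (d.getD pg 0 + 1)) PySem.Dict.empty))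
          (PySem.Dict.empty, (-1 : Int))
        (res.1.items, res.2, (pairs.length : Int)))
  have hg : (pvMkD gt).keys.Nodup := PySem.Dict.nodup_keys_ofList _
  have hv : ∀ rid, ((pvMkD gt).getD rid PySem.Dict.empty).keys.Nodup := pv_values_nodup gt
  dsimp only
  rw [pv_pairsB (pvMkD gt) (pvMkD pred) hg hv]
  rw [PySem.Dict.foldl_insert_getD_add_one_eq_counter]
  rw [PySem.List.foldl_congr_mem _ _ (pvStepB (pvPairsR (pvMkD gt) (pvMkD pred) (pvMkD gt).keys)) _
        (fun acc x _ => pv_stepB_eq _ acc x)]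
  rw [PySem.List.foldl_congr_mem _ _ (pvStepA (pvPairsR (pvMkD gt) (pvMkD pred) (pvMkD gt).keys)) _
        (fun acc x _ => pv_stepA_eq _ _ acc x)]
  rw [pv_head]
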